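-- pv_equiv track=rewrite | github.com/Agentic-Environmental-Engineering/GymVerse | gem/gem/envs/RLVE/new_nim_game_env.py | _compute_min_removed_sum
-- ===== SOURCE A (Python) =====
-- from typing import Any, Optional, SupportsFloat, Tuple, List
--
-- def _compute_min_removed_sum(A: List[int]) -> int:
--     """Compute the minimal total matches to remove so that remaining heaps form an xor-basis.
--
--     This follows the original algorithm:
--     - Sort A in descending order.
--     - Build a xor linear basis; if an element cannot be added, it contributes to the minimal removal sum.
--     """
--     if not A:
--         return 0
--     A_sorted = sorted(A, reverse=True)
--     max_bit = max(A_sorted).bit_length()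
--     D = [0] * max_bit
--
--     def add(x: int) -> bool:
--         for i in range(max_bit - 1, -1, -1):
--             if (x >> i) & 1:
--                 if D[i]:
--                     x ^= D[i]
--                 else:
--                     D[i] = x
--                     return True
--         return False
--
--     ans = 0
--     for x in A_sorted:
--         if not add(x):
--             ans += x
--     return ans
-- ===== SOURCE B (Python) =====
-- def _compute_min_removed_sum(A):
--     """Column-major Gaussian elimination over GF(2): for each bit from high to low,
--     take the first still-unpivoted row with that bit set as the pivot and clear that
--     bit from the other unpivoted rows; rows never chosen as pivot are dependent, and
--     their original values are summed."""
--     if not A: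
--         return 0
--     m = max(A).bit_length()
--     mask = (1 << m) - 1
--     rows = sorted(A, reverse=True)
--     cur = [x & mask for x in rows]
--     piv = [False] * len(rows)
--     for bit in range(m - 1, -1, -1):
--         p = -1
--         for i in range(len(rows)):
--             if not piv[i] and (cur[i] >> bit) & 1:
--                 if p < 0:
--                     p = i
--                     piv[i] = True
--                 else:
--                     cur[i] ^= cur[p]
--     return sum(x for x, q in zip(rows, piv) if not q)
-- ===== Notes on version B (the rewrite author's own statement) =====
-- stated objective: alternative
-- what changed: Replaced A's row-major greedy basis insertion (outer loop over elements, inner bit-scanning add() against a bit-indexed basis array D) by column-major Gaussian elimination on the whole matrix: the outer loop runs over bits from high to low, picks the first unpivoted row with that bit as pivot and XORs it into the other unpivoted rows; the answer is the sum of the rows never chosen as pivot, read off in a final pass.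
import Mathlib
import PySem

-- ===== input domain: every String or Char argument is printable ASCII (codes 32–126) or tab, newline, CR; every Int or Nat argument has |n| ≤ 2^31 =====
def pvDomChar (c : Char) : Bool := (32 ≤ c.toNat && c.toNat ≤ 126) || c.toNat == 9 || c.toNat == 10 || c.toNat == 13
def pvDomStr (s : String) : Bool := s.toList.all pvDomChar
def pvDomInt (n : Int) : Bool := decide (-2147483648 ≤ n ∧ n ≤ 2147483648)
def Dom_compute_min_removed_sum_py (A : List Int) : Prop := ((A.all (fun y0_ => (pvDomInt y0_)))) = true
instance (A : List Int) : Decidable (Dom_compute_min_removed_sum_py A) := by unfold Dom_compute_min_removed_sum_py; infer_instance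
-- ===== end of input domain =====

-- B replaces A's row-major greedy basis insertion (per-element bit-scanning `add` against a
-- bit-indexed array D) by column-major Gaussian elimination on the whole matrix: outer loop
-- over bits, first unpivoted row with the bit becomes pivot and is XORed into the rest; the
-- answer is the sum of rows never chosen as pivot (objective: alternative decomposition).

-- ===== PORT A =====
-- A's inner `add(x)`: `for i in range(max_bit-1, -1, -1)` with early return;
-- fuel n means the scan continues over bit indices n-1, …, 0.
def pvAddLoop (D : List Int) (x : Int) : Nat → List Int × Bool
  | 0 => (D, false)
  | i+1 =>
    if PySem.Int.band (x >>> i) 1 ≠ 0 then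
      if PySem.List.pyGetD D (i : Int) 0 ≠ 0 then
        pvAddLoop D (PySem.Int.bxor x (PySem.List.pyGetD D (i : Int) 0)) i
      else (PySem.List.pySetD D (i : Int) x, true)
    else pvAddLoop D x i

def compute_min_removed_sum_py (A : List Int) : Int :=
  if A = [] then 0
  else
    let As := PySem.List.sorted A (fun v => v) true
    let maxBit := PySem.Int.bitLength ((PySem.List.max? As (fun v => v)).getD 0)
    (As.foldl (fun (s : List Int × Int) x =>
      let a := pvAddLoop s.1 x maxBit
      if a.2 then (a.1, s.2) else (a.1, s.2 + x)) (List.replicate maxBit 0, 0)).2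

-- ===== PORT B =====
-- one stage of Source B's `for i in range(len(rows))` pass for a fixed bit; the state entries are
-- (cur[i], rows[i], piv[i]); `p` carries the pivot's cur value (Python indexes cur[p], which
-- is frozen once piv[p] is set, so carrying the value is the same computation).
def pvStage (bit : Nat) (p : Option Int) : List (Int × Int × Bool) → List (Int × Int × Bool)
  | [] => []
  | t :: rest =>
    if t.2.2 = false ∧ PySem.Int.band (t.1 >>> bit) 1 ≠ 0 then
      match p with
      | none => (t.1, t.2.1, true) :: pvStage bit (some t.1) rest
      | some pc => (PySem.Int.bxor t.1 pc, t.2.1, t.2.2) :: pvStage bit p rest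
    else t :: pvStage bit p rest

-- Source B's `for bit in range(m-1, -1, -1)`: fuel b means stages for bits b-1, …, 0 remain.
def pvStages : Nat → List (Int × Int × Bool) → List (Int × Int × Bool)
  | 0, s => s
  | b+1, s => pvStages b (pvStage b none s)

def compute_min_removed_sum_py_alt (A : List Int) : Int :=
  if A = [] then 0
  else
    let m := PySem.Int.bitLength ((PySem.List.max? A (fun v => v)).getD 0)
    let mask : Int := (1 <<< m) - 1
    let rows := PySem.List.sorted A (fun v => v) true
    let st := pvStages m (rows.map (fun x => (PySem.Int.band x mask, x, false)))
    st.foldl (fun a t => if t.2.2 then a else a + t.2.1) 0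

-- ===== PRECONDITION & SPEC =====
def Spec_compute_min_removed_sum_py (A : List Int) (out : Int) : Prop := out = compute_min_removed_sum_py_alt A
instance (A : List Int) (out : Int) : Decidable (Spec_compute_min_removed_sum_py A out) := by unfold Spec_compute_min_removed_sum_py; infer_instance

-- ===== CLAIM (what is proved, stated in full; the proofs are below) =====
def Claim_equal_compute_min_removed_sum_py : Prop := ∀ (A : List Int), Dom_compute_min_removed_sum_py A → Spec_compute_min_removed_sum_py A (compute_min_removed_sum_py A)

-- ===== LEMMAS AND PROOFS =====
-- pvW m x is Python's x & (2**m - 1): the value of x on the bit window [0, m) that both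
-- algorithms actually inspect; the equivalence is a simulation argument over pvW.
def pvW (m : Nat) (x : Int) : Nat :=
  match x with
  | .ofNat n => n % 2^m
  | .negSucc n => 2^m - 1 - n % 2^m
theorem pvXorMod (a b m : Nat) : (a ^^^ b) % 2^m = a % 2^m ^^^ b % 2^m := by
  apply Nat.eq_of_testBit_eq; intro i
  simp [Nat.testBit_mod_two_pow, Nat.testBit_xor]
  cases h : decide (i < m) <;> simp_all
theorem pvComp (m r : Nat) (h : r < 2^m) : (2^m-1) ^^^ r = 2^m-1-r := by
  induction m generalizing r with
  | zero => interval_cases r; decide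
  | succ m ih =>
    have h2 : (2:Nat)^(m+1) = 2*2^m := by ring
    have hd : ((2^(m+1)-1) ^^^ r) / 2 = (2^m-1) ^^^ (r/2) := by
      rw [Nat.xor_div_two]; congr 1; omega
    have hm : ((2^(m+1)-1) ^^^ r) % 2 = 1 - r % 2 := by
      have := Nat.testBit_xor (2^(m+1)-1) r 0
      simp [Nat.testBit_zero] at this
      rcases Nat.mod_two_eq_zero_or_one ((2^(m+1)-1) ^^^ r) with h1 | h1 <;>
        rcases Nat.mod_two_eq_zero_or_one r with hh | hh <;> simp_all
    have := ih (r/2) (by omega)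
    omega
theorem pvWneg (m n : Nat) : pvW m (Int.negSucc n) = (2^m-1) ^^^ (n % 2^m) := by
  simp only [pvW]
  exact (pvComp m _ (Nat.mod_lt _ (Nat.two_pow_pos m))).symm
theorem pvBxor1 (a b : Nat) : PySem.Int.bxor (Int.ofNat a) (Int.ofNat b) = Int.ofNat (a ^^^ b) := by
  simp [PySem.Int.bxor]
theorem pvNegSuccAux (a : Nat) : -Int.negSucc a - 1 = (a:Int) := by
  simp [Int.negSucc_eq]
theorem pvBxor2 (a b : Nat) : PySem.Int.bxor (Int.ofNat a) (Int.negSucc b) = Int.negSucc (a ^^^ b) := by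
  simp [PySem.Int.bxor, Int.negSucc_not_nonneg]
  rw [Int.negSucc_eq]; ring
theorem pvBxor3 (a b : Nat) : PySem.Int.bxor (Int.negSucc a) (Int.ofNat b) = Int.negSucc (a ^^^ b) := by
  simp [PySem.Int.bxor, Int.negSucc_not_nonneg]
  rw [Int.negSucc_eq]; ring
theorem pvBxor4 (a b : Nat) : PySem.Int.bxor (Int.negSucc a) (Int.negSucc b) = Int.ofNat (a ^^^ b) := by
  simp [PySem.Int.bxor, Int.negSucc_not_nonneg, pvNegSuccAux]
theorem pvW_lt (m : Nat) (x : Int) : pvW m x < 2^m := by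
  have : (0:Nat) < 2^m := Nat.two_pow_pos m
  cases x <;> simp [pvW] <;> omega
theorem pvW_bxor (m : Nat) (x y : Int) : pvW m (PySem.Int.bxor x y) = pvW m x ^^^ pvW m y := by
  cases x with
  | ofNat a => cases y with
    | ofNat b =>
      have : PySem.Int.bxor (Int.ofNat a) (Int.ofNat b) = Int.ofNat (a ^^^ b) := by
        simp [PySem.Int.bxor]
      rw [this]; simp only [pvW]; exact pvXorMod a b m
    | negSucc b =>
      rw [pvBxor2]; rw [pvWneg, pvWneg]; simp only [pvW]
      rw [pvXorMod]
      ac_rfl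
  | negSucc a => cases y with
    | ofNat b =>
      rw [pvBxor3]; rw [pvWneg, pvWneg]; simp only [pvW]
      rw [pvXorMod, Nat.xor_assoc]
    | negSucc b =>
      rw [pvBxor4]; rw [pvWneg, pvWneg]; simp only [pvW]
      rw [pvXorMod, Nat.xor_comm (2^m-1) (a % 2^m), Nat.xor_assoc,
        ← Nat.xor_assoc (2^m-1) (2^m-1), Nat.xor_self, Nat.zero_xor]

theorem pvShiftNeg (n k : Nat) : (Int.negSucc n) >>> k = Int.negSucc (n >>> k) := rfl
theorem pvShiftPos (n k : Nat) : (Int.ofNat n) >>> k = Int.ofNat (n >>> k) := rfl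
theorem pvBand1neg (t : Nat) : PySem.Int.band (Int.negSucc t) 1 = Int.ofNat (1 - (t % 2)) := by
  simp [PySem.Int.band, Int.negSucc_not_nonneg, pvNegSuccAux, Nat.and_comm, Nat.and_one_is_mod]
theorem pvBandMaskNeg (m t : Nat) : PySem.Int.band (Int.negSucc t) ((2^m - 1 : Nat) : Int) =
    Int.ofNat (2^m - 1 - t % 2^m) := by
  simp only [PySem.Int.band, Int.negSucc_not_nonneg, if_false, Int.natCast_nonneg, if_true,
    pvNegSuccAux, Int.toNat_natCast]
  rw [Nat.and_comm, Nat.and_two_pow_sub_one_eq_mod]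
  rfl
theorem pvBandMaskPos (m t : Nat) : PySem.Int.band (Int.ofNat t) ((2^m - 1 : Nat) : Int) =
    Int.ofNat (t % 2^m) := by
  have := PySem.Int.band_natCast t (2^m - 1)
  simp only [Int.ofNat_eq_natCast, this, Nat.and_two_pow_sub_one_eq_mod]
theorem pvShl (m : Nat) : ((1 <<< m : Int)) - 1 = ((2^m - 1 : Nat) : Int) := by
  have h1 : (1 <<< m : Int) = Int.ofNat (1 <<< m) := rfl
  have h2 : (1 : Nat) <<< m = 2^m := Nat.one_shiftLeft m
  rw [h1, h2]
  have : (1:Nat) ≤ 2^m := Nat.one_le_two_pow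
  push_cast [this]
  simp [Int.ofNat_eq_natCast]
theorem pvBandMask (m : Nat) (x : Int) :
    PySem.Int.band x ((1 <<< m : Int) - 1) = Int.ofNat (pvW m x) := by
  rw [pvShl]
  cases x with
  | ofNat n => rw [pvBandMaskPos]; rfl
  | negSucc n => rw [pvBandMaskNeg]; rfl
theorem pvBit (m k : Nat) (x : Int) (hk : k < m) :
    PySem.Int.band (x >>> k) 1 = if (pvW m x).testBit k then 1 else 0 := by
  cases x with
  | ofNat n =>
    rw [pvShiftPos]
    have h1 : PySem.Int.band (Int.ofNat (n >>> k)) 1 = ((n >>> k) &&& 1 : Nat) := by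
      have := PySem.Int.band_natCast (n >>> k) 1
      simpa using this
    rw [h1, Nat.and_one_is_mod]
    have h2 : (pvW m (Int.ofNat n)).testBit k = n.testBit k := by
      simp only [pvW, Nat.testBit_mod_two_pow]
      simp [hk]
    rw [h2, ← Nat.decide_shiftRight_mod_two_eq_one]
    rcases Nat.mod_two_eq_zero_or_one (n >>> k) with h | h <;> simp [h]
  | negSucc n =>
    rw [pvShiftNeg, pvBand1neg]
    have h2 : (pvW m (Int.negSucc n)).testBit k = !n.testBit k := by
      rw [pvWneg, Nat.testBit_xor, Nat.testBit_two_pow_sub_one, Nat.testBit_mod_two_pow]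
      simp [hk]
    rw [h2, ← Nat.decide_shiftRight_mod_two_eq_one]
    rcases Nat.mod_two_eq_zero_or_one (n >>> k) with h | h <;> simp [h]
theorem pvBitNat (b n : Nat) :
    PySem.Int.band ((Int.ofNat n) >>> b) 1 = if n.testBit b then 1 else 0 := by
  rw [pvShiftPos]
  have h1 : PySem.Int.band (Int.ofNat (n >>> b)) 1 = ((n >>> b) &&& 1 : Nat) := by
    have := PySem.Int.band_natCast (n >>> b) 1
    simpa using this
  rw [h1, Nat.and_one_is_mod, ← Nat.decide_shiftRight_mod_two_eq_one]
  rcases Nat.mod_two_eq_zero_or_one (n >>> b) with h | h <;> simp [h]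
theorem pvBLle (y k : Nat) : PySem.Int.bitLength (y : Int) ≤ k ↔ y < 2^k := by
  constructor
  · intro h
    have h1 := PySem.Int.lt_two_pow_bitLength (y : Int)
    simp only [Int.natAbs_natCast] at h1
    exact lt_of_lt_of_le h1 (Nat.pow_le_pow_right (by omega) h)
  · intro h
    by_cases hy : y = 0
    · subst hy; simp [PySem.Int.bitLength_zero]
    · by_contra hc
      push Not at hc
      have h2 := PySem.Int.two_pow_bitLength_le (y : Int) (by exact_mod_cast hy)
      simp only [Int.natAbs_natCast] at h2
      have : 2^k ≤ 2^(PySem.Int.bitLength (y:Int) - 1) := Nat.pow_le_pow_right (by omega) (by omega)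
      omega
theorem pvTestBitHigh (y k : Nat) (h1 : 2^k ≤ y) (h2 : y < 2^(k+1)) : y.testBit k = true := by
  have hd : y / 2^k = 1 := by
    have hp : (0:Nat) < 2^k := Nat.two_pow_pos k
    have : y < 2^k * 2 := by rw [pow_succ] at h2; omega
    rw [Nat.div_eq_iff (by omega : 0 < 2^k)]
    omega
  rw [← Nat.decide_shiftRight_mod_two_eq_one, Nat.shiftRight_eq_div_pow, hd]
  decide
theorem pvLtOfTestBitFalse (y k : Nat) (h2 : y < 2^(k+1)) (h : y.testBit k = false) : y < 2^k := by
  by_contra hc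
  rw [pvTestBitHigh y k (by omega) h2] at h
  simp at h
theorem pvBLeq (v k : Nat) (h1 : 2^k ≤ v) (h2 : v < 2^(k+1)) :
    PySem.Int.bitLength (v : Int) = k+1 := by
  have ha := (pvBLle v (k+1)).2 h2
  have hb : ¬ (PySem.Int.bitLength (v : Int) ≤ k) := by
    intro hc; have := (pvBLle v k).1 hc; omega
  omega

-- the row-major greedy (reduce against an ordered basis list): the common abstraction
-- through which A's fold and B's bit stages are related.
def pvReduce (basis : List Int) (y : Int) : Nat × Int :=
  match basis with
  | [] => (0, y)
  | b :: rest =>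
    if y = 0 ∨ PySem.Int.bitLength b < PySem.Int.bitLength y then (0, y)
    else
      let y' := if PySem.Int.bitLength y = PySem.Int.bitLength b then PySem.Int.bxor y b else y
      let r := pvReduce rest y'
      (r.1 + 1, r.2)

def pvG (B : List Int) (a : Int) : List (Int × Int) → Int
  | [] => a
  | p :: rest =>
    let t := pvReduce B p.1
    if t.2 ≠ 0 then pvG (PySem.List.insert B ((t.1 : Nat) : Int) t.2) a rest
    else pvG B (a + p.2) rest

theorem pvReduce_zero (l : List Int) : pvReduce l 0 = (0, 0) := by
  cases l <;> simp [pvReduce]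

theorem pvReduce_le (l : List Int) (y : Int) : (pvReduce l y).1 ≤ l.length := by
  induction l generalizing y with
  | nil => simp [pvReduce]
  | cons b rest ih =>
    unfold pvReduce
    split
    · simp
    · simp only [List.length_cons]
      have := ih (if PySem.Int.bitLength y = PySem.Int.bitLength b then PySem.Int.bxor y b else y)
      omega

theorem pvInsert_cons (b : Int) (l : List Int) (p : Nat) (v : Int) (hp : p ≤ l.length) :
    PySem.List.insert (b :: l) (((p+1 : Nat) : Int)) v = b :: PySem.List.insert l ((p : Nat) : Int) v := by
  rw [PySem.List.insert_natCast _ (p+1) v (by simpa using hp), PySem.List.insert_natCast _ p v hp]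
  simp

-- ===== A-side: the fold over pvAddLoop computes the row-major greedy =====
def pvEnt (m : Nat) (D : List Int) (i : Nat) : Option Int :=
  if D.getD i 0 = 0 then none else some (Int.ofNat (pvW m (D.getD i 0)))

def pvRB (m : Nat) (D : List Int) (k : Nat) : List Int :=
  ((List.range k).reverse).filterMap (pvEnt m D)

theorem pvRB_succ (m : Nat) (D : List Int) (k : Nat) :
    pvRB m D (k+1) = (pvEnt m D k).toList ++ pvRB m D k := by
  unfold pvRB
  rw [List.range_succ, List.reverse_append]
  simp [List.filterMap_cons]
  cases h : pvEnt m D k <;> simp [h]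

theorem pvGetD_set_ne (D : List Int) (i j : Nat) (v : Int) (h : j ≠ i) :
    (D.set i v).getD j 0 = D.getD j 0 := by
  simp [List.getD, List.getElem?_set_ne (by omega : i ≠ j)]

theorem pvEnt_set_ne (m : Nat) (D : List Int) (i j : Nat) (v : Int) (h : j ≠ i) :
    pvEnt m (D.set i v) j = pvEnt m D j := by
  unfold pvEnt
  rw [pvGetD_set_ne D i j v h]

theorem pvRB_set_ge (m : Nat) (D : List Int) (i k : Nat) (v : Int) (h : k ≤ i) :
    pvRB m (D.set i v) k = pvRB m D k := by
  unfold pvRB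
  apply List.filterMap_congr
  intro j hj
  simp at hj
  exact pvEnt_set_ne m D i j v (by omega)

theorem pvRB_mem (m : Nat) (D : List Int) (k : Nat) (b : Int) (hb : b ∈ pvRB m D k) :
    ∃ i, i < k ∧ D.getD i 0 ≠ 0 ∧ b = Int.ofNat (pvW m (D.getD i 0)) := by
  unfold pvRB at hb
  rw [List.mem_filterMap] at hb
  obtain ⟨i, hi, hent⟩ := hb
  simp at hi
  refine ⟨i, hi, ?_, ?_⟩ <;> unfold pvEnt at hent <;>
    by_cases h : D.getD i 0 = 0 <;> simp [h] at hent <;> simp [h, hent]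

theorem pvZeroAdd (m : Nat) (D : List Int) (x : Int) (hx : pvW m x = 0) :
    ∀ k, k ≤ m → pvAddLoop D x k = (D, false) := by
  intro k
  induction k with
  | zero => intro _; rfl
  | succ i ih =>
    intro hk
    have hb := pvBit m i x (by omega)
    rw [hx] at hb
    simp at hb
    unfold pvAddLoop
    rw [hb]
    simp
    exact ih (by omega)

theorem pvGetD_set_self (D : List Int) (k : Nat) (v : Int) (h : k < D.length) :
    (D.set k v).getD k 0 = v := by
  simp [List.getD, List.getElem?_set_self, h]

theorem pvCore (m : Nat) (D : List Int) (hlen : D.length = m)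
    (hinv : ∀ i, i < m → D.getD i 0 ≠ 0 →
      (pvW m (D.getD i 0)).testBit i = true ∧ ∀ j, i < j → (pvW m (D.getD i 0)).testBit j = false) :
    ∀ k, k ≤ m → ∀ x, pvW m x < 2^k →
    ((pvAddLoop D x k).2 = false ∧ (pvAddLoop D x k).1 = D ∧
       (pvReduce (pvRB m D k) (Int.ofNat (pvW m x))).2 = 0) ∨
    (∃ i x', (pvAddLoop D x k).2 = true ∧ i < k ∧ D.getD i 0 = 0 ∧
       (pvAddLoop D x k).1 = D.set i x' ∧
       (pvReduce (pvRB m D k) (Int.ofNat (pvW m x))).2 = Int.ofNat (pvW m x') ∧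
       pvW m x' ≠ 0 ∧ (pvW m x').testBit i = true ∧
       (∀ j, i < j → (pvW m x').testBit j = false) ∧
       PySem.List.insert (pvRB m D k) (((pvReduce (pvRB m D k) (Int.ofNat (pvW m x))).1 : Nat) : Int)
         (Int.ofNat (pvW m x')) = pvRB m (D.set i x') k) := by
  intro k
  induction k with
  | zero =>
    intro _ x hx
    have hy : pvW m x = 0 := by omega
    left
    rw [hy]
    refine ⟨rfl, rfl, ?_⟩
    have : (Int.ofNat 0) = (0:Int) := rfl
    rw [this, pvReduce_zero]
  | succ k ih =>
    intro hk x hx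
    by_cases hy0 : pvW m x = 0
    · left
      rw [pvZeroAdd m D x hy0 (k+1) hk, hy0]
      refine ⟨rfl, rfl, ?_⟩
      have : (Int.ofNat 0) = (0:Int) := rfl
      rw [this, pvReduce_zero]
    · have hkm : k < m := by omega
      have hbit := pvBit m k x hkm
      rw [pvRB_succ]
      cases hb : (pvW m x).testBit k with
      | false =>
        have hxlt : pvW m x < 2^k := pvLtOfTestBitFalse _ _ hx hb
        rw [hb] at hbit; simp at hbit
        have hA : pvAddLoop D x (k+1) = pvAddLoop D x k := by
          simp [pvAddLoop, hbit]
        rw [hA]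
        have hbly : PySem.Int.bitLength (Int.ofNat (pvW m x)) ≤ k := by
          exact_mod_cast (pvBLle _ _).2 hxlt
        cases hent : pvEnt m D k with
        | none =>
          simp only [hent, Option.toList_none, List.nil_append]
          rcases ih (by omega) x hxlt with hL | ⟨i, x', h1, h2, h3, h4, h5, h6, h7, h8, h9⟩
          · left; exact hL
          · right
            refine ⟨i, x', h1, by omega, h3, h4, h5, h6, h7, h8, ?_⟩
            rw [h9, pvRB_succ]
            have : pvEnt m (D.set i x') k = pvEnt m D k :=
              pvEnt_set_ne m D i k x' (by omega)
            rw [this, hent]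
            simp
        | some b =>
          have hDk : D.getD k 0 ≠ 0 := by
            intro hc
            exact absurd hent (by simp only [pvEnt]; rw [hc]; simp)
          have hbval : b = Int.ofNat (pvW m (D.getD k 0)) := by
            simp [pvEnt, hDk] at hent
            exact_mod_cast hent.2.symm
          obtain ⟨ht1, ht2⟩ := hinv k hkm hDk
          have hge : 2^k ≤ pvW m (D.getD k 0) := Nat.ge_two_pow_of_testBit ht1
          have hlt : pvW m (D.getD k 0) < 2^(k+1) := by
            apply Nat.lt_pow_two_of_testBit
            intro j hj
            exact ht2 j (by omega)
          have hblb : PySem.Int.bitLength b = k+1 := by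
            rw [hbval]
            exact_mod_cast pvBLeq _ k hge hlt
          have hyne : (Int.ofNat (pvW m x)) ≠ 0 := by
            simp [Int.ofNat_eq_natCast, Int.natCast_eq_zero]; omega
          have hred : pvReduce (b :: pvRB m D k) (Int.ofNat (pvW m x)) =
              ((pvReduce (pvRB m D k) (Int.ofNat (pvW m x))).1 + 1,
               (pvReduce (pvRB m D k) (Int.ofNat (pvW m x))).2) := by
            rw [pvReduce]
            rw [if_neg (by
              push Not
              exact ⟨hyne, by omega⟩)]
            simp only []
            rw [if_neg (by omega)]
          simp only [Option.toList_some, List.singleton_append]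
          rw [hred]
          rcases ih (by omega) x hxlt with ⟨h1, h2, h3⟩ | ⟨i, x', h1, h2, h3, h4, h5, h6, h7, h8, h9⟩
          · left; exact ⟨h1, h2, h3⟩
          · right
            refine ⟨i, x', h1, by omega, h3, h4, h5, h6, h7, h8, ?_⟩
            have hle := pvReduce_le (pvRB m D k) (Int.ofNat (pvW m x))
            rw [pvInsert_cons b _ _ _ hle, h9, pvRB_succ]
            have : pvEnt m (D.set i x') k = pvEnt m D k := pvEnt_set_ne m D i k x' (by omega)
            rw [this, hent]
            simp
      | true =>
        rw [hb] at hbit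
        simp at hbit
        have hyge : 2^k ≤ pvW m x := Nat.ge_two_pow_of_testBit hb
        have hbly : PySem.Int.bitLength (Int.ofNat (pvW m x)) = k+1 := by
          exact_mod_cast pvBLeq _ k hyge hx
        have hgd : PySem.List.pyGetD D ((k : Nat) : Int) 0 = D.getD k 0 := by
          simp [PySem.List.pyGetD_natCast]
        by_cases hDk : D.getD k 0 = 0
        · have hent : pvEnt m D k = none := by
            simp only [pvEnt]; rw [hDk]; simp
          have hA : pvAddLoop D x (k+1) = (D.set k x, true) := by
            rw [pvAddLoop, hgd]
            rw [if_pos (by rw [hbit]; omega), if_neg (by simp only [ne_eq, not_not]; exact hDk)]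
            simp
          have hxne : x ≠ 0 := by
            intro hc; apply hy0; rw [hc]; simp [pvW]
          have hred : pvReduce (pvRB m D k) (Int.ofNat (pvW m x)) = (0, Int.ofNat (pvW m x)) := by
            cases hrb : pvRB m D k with
            | nil => rfl
            | cons b1 rest =>
              obtain ⟨i, hi, hine, hival⟩ := pvRB_mem m D k b1 (by rw [hrb]; simp)
              obtain ⟨ht1, ht2⟩ := hinv i (by omega) hine
              have hvlt : pvW m (D.getD i 0) < 2^(i+1) := by
                apply Nat.lt_pow_two_of_testBit
                intro j hj
                exact ht2 j (by omega)
              have hbl1 : PySem.Int.bitLength b1 ≤ k := by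
                rw [hival]
                have : pvW m (D.getD i 0) < 2^k :=
                  lt_of_lt_of_le hvlt (Nat.pow_le_pow_right (by omega) (by omega))
                exact_mod_cast (pvBLle _ _).2 this
              rw [pvReduce]
              rw [if_pos (Or.inr (by omega))]
          simp only [hent, Option.toList_none, List.nil_append]
          rw [hA, hred]
          right
          refine ⟨k, x, rfl, by omega, hDk, rfl, rfl, hy0, hb, ?_, ?_⟩
          · intro j hj
            exact Nat.testBit_lt_two_pow
              (lt_of_lt_of_le hx (Nat.pow_le_pow_right (by omega) (by omega)))
          · have h0 : ((0 : Nat) : Int) = 0 := rfl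
            rw [h0, PySem.List.insert_zero, pvRB_succ]
            have hgds : (D.set k x).getD k 0 = x := pvGetD_set_self D k x (by omega)
            have hent' : pvEnt m (D.set k x) k = some (Int.ofNat (pvW m x)) := by
              simp only [pvEnt]
              rw [hgds, if_neg hxne]
            rw [hent', pvRB_set_ge m D k k x (by omega)]
            simp
        · have hent : pvEnt m D k = some (Int.ofNat (pvW m (D.getD k 0))) := by
            simp only [pvEnt]
            rw [if_neg hDk]
          obtain ⟨ht1, ht2⟩ := hinv k hkm hDk
          have hge : 2^k ≤ pvW m (D.getD k 0) := Nat.ge_two_pow_of_testBit ht1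
          have hlt : pvW m (D.getD k 0) < 2^(k+1) := by
            apply Nat.lt_pow_two_of_testBit
            intro j hj
            exact ht2 j (by omega)
          have hblb : PySem.Int.bitLength (Int.ofNat (pvW m (D.getD k 0))) = k+1 := by
            exact_mod_cast pvBLeq _ k hge hlt
          set x2 := PySem.Int.bxor x (D.getD k 0) with hx2
          have hwx2 : pvW m x2 = pvW m x ^^^ pvW m (D.getD k 0) := pvW_bxor m x (D.getD k 0)
          have hx2lt : pvW m x2 < 2^k := by
            apply Nat.lt_pow_two_of_testBit
            intro j hj
            rw [hwx2, Nat.testBit_xor]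
            by_cases hjk : j = k
            · subst hjk; rw [hb, ht1]; rfl
            · rw [Nat.testBit_lt_two_pow
                (lt_of_lt_of_le hx (Nat.pow_le_pow_right (by omega) (by omega : k+1 ≤ j))),
                Nat.testBit_lt_two_pow
                (lt_of_lt_of_le hlt (Nat.pow_le_pow_right (by omega) (by omega : k+1 ≤ j)))]
              rfl
          have hA : pvAddLoop D x (k+1) = pvAddLoop D x2 k := by
            rw [pvAddLoop, hgd]
            rw [if_pos (by rw [hbit]; omega), if_pos hDk]
          have hbxorgoal : PySem.Int.bxor (Int.ofNat (pvW m x)) (Int.ofNat (pvW m (D.getD k 0))) =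
              Int.ofNat (pvW m x2) := by
            rw [pvBxor1, hwx2]
          have hred : pvReduce (Int.ofNat (pvW m (D.getD k 0)) :: pvRB m D k) (Int.ofNat (pvW m x)) =
              ((pvReduce (pvRB m D k) (Int.ofNat (pvW m x2))).1 + 1,
               (pvReduce (pvRB m D k) (Int.ofNat (pvW m x2))).2) := by
            rw [pvReduce]
            rw [if_neg (by
              push Not
              constructor
              · simp [Int.ofNat_eq_natCast, Int.natCast_eq_zero]; omega
              · omega)]
            simp only []
            rw [if_pos (by omega), hbxorgoal]
          simp only [hent, Option.toList_some, List.singleton_append]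
          rw [hA, hred]
          rcases ih (by omega) x2 hx2lt with ⟨h1, h2, h3⟩ | ⟨i, x', h1, h2, h3, h4, h5, h6, h7, h8, h9⟩
          · left; exact ⟨h1, h2, h3⟩
          · right
            refine ⟨i, x', h1, by omega, h3, h4, h5, h6, h7, h8, ?_⟩
            have hle := pvReduce_le (pvRB m D k) (Int.ofNat (pvW m x2))
            rw [pvInsert_cons _ _ _ _ hle, h9, pvRB_succ]
            have : pvEnt m (D.set i x') k = pvEnt m D k := pvEnt_set_ne m D i k x' (by omega)
            rw [this, hent]
            simp

theorem pvInt_ofNat_ne_zero (n : Nat) (h : n ≠ 0) : Int.ofNat n ≠ 0 := by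
  simp [Int.ofNat_eq_natCast, Int.natCast_eq_zero]; omega

theorem pvFold (m : Nat) (xs : List Int) : ∀ (D basis : List Int) (ansA ansB : Int),
    D.length = m →
    (∀ i, i < m → D.getD i 0 ≠ 0 →
      (pvW m (D.getD i 0)).testBit i = true ∧ ∀ j, i < j → (pvW m (D.getD i 0)).testBit j = false) →
    basis = pvRB m D m → ansA = ansB →
    (xs.foldl (fun (s : List Int × Int) x =>
        let a := pvAddLoop s.1 x m
        if a.2 then (a.1, s.2) else (a.1, s.2 + x)) (D, ansA)).2 =
    pvG basis ansB (xs.map (fun x => (PySem.Int.band x ((1 <<< m : Int) - 1), x))) := by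
  induction xs with
  | nil => intro D basis ansA ansB _ _ _ hans; simpa [pvG] using hans
  | cons x rest ih =>
    intro D basis ansA ansB hlen hinv hbasis hans
    simp only [List.foldl_cons, List.map_cons, pvG]
    rw [pvBandMask m x, hbasis]
    rcases pvCore m D hlen hinv m (le_refl m) x (pvW_lt m x)
      with ⟨h1, h2, h3⟩ | ⟨i, x', h1, h2, h3, h4, h5, h6, h7, h8, h9⟩
    · rw [h3]
      simp only [h1, h2, if_false, ne_eq, not_true_eq_false, Bool.false_eq_true, not_not]
      exact ih D (pvRB m D m) (ansA + x) (ansB + x) hlen hinv rfl (by omega)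
    · rw [h5]
      simp only [h1, h4, if_true, ne_eq, pvInt_ofNat_ne_zero _ h6, not_false_eq_true]
      rw [← h5]
      rw [h5, h9]
      apply ih (D.set i x') _ ansA ansB (by simp [hlen]) ?_ rfl hans
      intro i' hi' hne
      by_cases hii : i' = i
      · subst hii
        rw [pvGetD_set_self D i' x' (by omega)] at hne ⊢
        exact ⟨h7, h8⟩
      · rw [pvGetD_set_ne D i i' x' hii] at hne ⊢
        exact hinv i' hi' hne

theorem pvMaxPerm (xs ys : List Int) (hperm : xs.Perm ys) :
    PySem.List.max? xs (fun v => v) = PySem.List.max? ys (fun v => v) := by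
  cases hx : PySem.List.max? xs (fun v => v) with
  | none =>
    have hxs : xs = [] := (PySem.List.max?_eq_none_iff xs _).mp hx
    subst hxs
    have hys : ys = [] := hperm.symm.eq_nil
    subst hys
    exact ((PySem.List.max?_eq_none_iff ([] : List Int) _).mpr rfl).symm
  | some a =>
    cases hy : PySem.List.max? ys (fun v => v) with
    | none =>
      have hys : ys = [] := (PySem.List.max?_eq_none_iff ys _).mp hy
      subst hys
      have hxs : xs = [] := hperm.eq_nil
      subst hxs
      exact absurd hx (by rw [(PySem.List.max?_eq_none_iff ([] : List Int) _).mpr rfl]; simp)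
    | some b =>
      have ha := PySem.List.max?_mem hx
      have hb := PySem.List.max?_mem hy
      have h1 : a ≤ b := PySem.List.max?_isMax hy a (hperm.mem_iff.mp ha)
      have h2 : b ≤ a := PySem.List.max?_isMax hx b (hperm.mem_iff.mpr hb)
      rw [le_antisymm h1 h2]

theorem pvRepl_getD (m i : Nat) : (List.replicate m (0:Int)).getD i 0 = 0 := by
  rcases Nat.lt_or_ge i m with h | h <;> simp [List.getD, h]

theorem pvRB_repl (m k : Nat) : pvRB m (List.replicate m (0:Int)) k = [] := by
  unfold pvRB
  rw [List.filterMap_eq_nil_iff]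
  intro a _
  simp [pvEnt]

-- ===== B-side: the bit stages compute the same row-major greedy =====
def pvNP (s : List (Int × Int × Bool)) : List (Int × Int) :=
  s.filterMap (fun t => if t.2.2 then none else some (t.1, t.2.1))

def pvAnsF (s : List (Int × Int × Bool)) : Int :=
  s.foldl (fun a t => if t.2.2 then a else a + t.2.1) 0

def pvF (b : Nat) (c : Int) (t : Int × Int × Bool) : Int × Int × Bool :=
  if t.2.2 = false ∧ PySem.Int.band (t.1 >>> b) 1 ≠ 0 then (PySem.Int.bxor t.1 c, t.2.1, t.2.2) else t

def pvGd (b : Nat) (c : Int) (p : Int × Int) : Int × Int :=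
  if PySem.Int.band (p.1 >>> b) 1 ≠ 0 then (PySem.Int.bxor p.1 c, p.2) else p

theorem pvStage_id (b : Nat) : ∀ (s : List (Int × Int × Bool)),
    (∀ t ∈ s, ¬(t.2.2 = false ∧ PySem.Int.band (t.1 >>> b) 1 ≠ 0)) →
    pvStage b none s = s := by
  intro s
  induction s with
  | nil => intro _; rfl
  | cons t rest ih =>
    intro h
    unfold pvStage
    rw [if_neg (h t (by simp))]
    rw [ih (fun u hu => h u (by simp [hu]))]

theorem pvStage_append (b : Nat) : ∀ (s1 rest : List (Int × Int × Bool)),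
    (∀ t ∈ s1, ¬(t.2.2 = false ∧ PySem.Int.band (t.1 >>> b) 1 ≠ 0)) →
    pvStage b none (s1 ++ rest) = s1 ++ pvStage b none rest := by
  intro s1
  induction s1 with
  | nil => intro rest _; rfl
  | cons t s1' ih =>
    intro rest h
    rw [List.cons_append, pvStage, if_neg (h t (by simp)),
      ih rest (fun u hu => h u (by simp [hu])), List.cons_append]

theorem pvStage_map (b : Nat) (c : Int) : ∀ (s : List (Int × Int × Bool)),
    pvStage b (some c) s = s.map (pvF b c) := by
  intro s
  induction s with
  | nil => rfl
  | cons t rest ih =>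
    unfold pvStage
    by_cases h : t.2.2 = false ∧ PySem.Int.band (t.1 >>> b) 1 ≠ 0
    · rw [if_pos h]
      simp only [List.map_cons, pvF, if_pos h, ih]
    · rw [if_neg h]
      simp only [List.map_cons, pvF, if_neg h, ih]

theorem pvStage_piv (b : Nat) (c o : Int) (s2 : List (Int × Int × Bool))
    (hc : PySem.Int.band (c >>> b) 1 ≠ 0) :
    pvStage b none ((c, o, false) :: s2) = (c, o, true) :: s2.map (pvF b c) := by
  unfold pvStage
  rw [if_pos ⟨rfl, hc⟩, pvStage_map]

theorem pvFirst {α : Type} (P : α → Prop) [DecidablePred P] : ∀ (s : List α),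
    (¬ ∀ t ∈ s, ¬ P t) → ∃ s1 t s2, s = s1 ++ t :: s2 ∧ P t ∧ ∀ u ∈ s1, ¬ P u := by
  intro s
  induction s with
  | nil => intro h; exact absurd (by simp) h
  | cons a rest ih =>
    intro h
    by_cases ha : P a
    · exact ⟨[], a, rest, by simp, ha, by simp⟩
    · have : ¬ ∀ t ∈ rest, ¬ P t := by
        intro hc
        exact h (by
          intro t ht
          rcases List.mem_cons.mp ht with h1 | h1
          · subst h1; exact ha
          · exact hc t h1)
      obtain ⟨s1, t, s2, h1, h2, h3⟩ := ih this
      exact ⟨a :: s1, t, s2, by simp [h1], h2, by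
        intro u hu
        rcases List.mem_cons.mp hu with h4 | h4
        · subst h4; exact ha
        · exact h3 u h4⟩

theorem pvNP_append (s1 s2 : List (Int × Int × Bool)) :
    pvNP (s1 ++ s2) = pvNP s1 ++ pvNP s2 := by
  simp [pvNP]

theorem pvNP_cons (t : Int × Int × Bool) (s : List (Int × Int × Bool)) :
    pvNP (t :: s) = (if t.2.2 then [] else [(t.1, t.2.1)]) ++ pvNP s := by
  by_cases h : t.2.2 <;> simp [pvNP, List.filterMap_cons, h]

theorem pvNP_map (b : Nat) (c : Int) : ∀ (s : List (Int × Int × Bool)),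
    pvNP (s.map (pvF b c)) = (pvNP s).map (pvGd b c) := by
  intro s
  induction s with
  | nil => rfl
  | cons t rest ih =>
    rw [List.map_cons, pvNP_cons, pvNP_cons, List.map_append, ih]
    by_cases hq : t.2.2
    · have h1 : pvF b c t = t := by unfold pvF; rw [if_neg (by simp [hq])]
      rw [h1]
      simp [hq]
    · have hq' : t.2.2 = false := by simpa using hq
      by_cases hb : PySem.Int.band (t.1 >>> b) 1 ≠ 0
      · have h1 : pvF b c t = (PySem.Int.bxor t.1 c, t.2.1, t.2.2) := by
          unfold pvF; rw [if_pos (And.intro hq' hb)]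
        rw [h1]
        simp [hq', pvGd, hb]
      · have h1 : pvF b c t = t := by unfold pvF; rw [if_neg (by simp [hb])]
        rw [h1]
        simp [hq', pvGd, hb]

theorem pvNP_mem (s : List (Int × Int × Bool)) (p : Int × Int) (h : p ∈ pvNP s) :
    ∃ t ∈ s, t.2.2 = false ∧ p.1 = t.1 ∧ p.2 = t.2.1 := by
  unfold pvNP at h
  rw [List.mem_filterMap] at h
  obtain ⟨t, ht, he⟩ := h
  by_cases hq : t.2.2
  · simp [hq] at he
  · simp [hq] at he
    exact ⟨t, ht, by simpa using hq, by simp [← he], by simp [← he]⟩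

theorem pvAnsF_from (s : List (Int × Int × Bool)) : ∀ (a : Int),
    s.foldl (fun a t => if t.2.2 then a else a + t.2.1) a = a + pvAnsF s := by
  induction s with
  | nil => intro a; simp [pvAnsF]
  | cons t rest ih =>
    intro a
    simp only [List.foldl_cons, pvAnsF]
    rw [ih, ih]
    by_cases hq : t.2.2 <;> simp [hq] <;> ring

theorem pvAnsF_NP : ∀ (s : List (Int × Int × Bool)),
    pvAnsF s = ((pvNP s).map Prod.snd).sum := by
  intro s
  induction s with
  | nil => rfl
  | cons t rest ih =>
    rw [pvNP_cons]
    have h1 : pvAnsF (t :: rest) = (if t.2.2 then 0 else t.2.1) + pvAnsF rest := by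
      unfold pvAnsF
      simp only [List.foldl_cons]
      rw [pvAnsF_from]
      by_cases hq : t.2.2 <;> simp [hq, pvAnsF]
    rw [h1, ih]
    by_cases hq : t.2.2 <;> simp [hq]

theorem pvG_zero : ∀ (l : List (Int × Int)) (B : List Int) (a : Int),
    (∀ p ∈ l, p.1 = 0) → pvG B a l = a + (l.map Prod.snd).sum := by
  intro l
  induction l with
  | nil => intro B a _; simp [pvG]
  | cons p rest ih =>
    intro B a h
    have hp : p.1 = 0 := h p (by simp)
    simp only [pvG, hp, pvReduce_zero]
    simp only [ne_eq, not_true_eq_false, if_false]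
    rw [ih B (a + p.2) (fun q hq => h q (by simp [hq]))]
    simp
    ring

theorem pvReduceBound (K : Nat) : ∀ (B : List Int) (n : Nat),
    (∀ b ∈ B, ∃ nb : Nat, nb < 2^K ∧ b = Int.ofNat nb) → n < 2^K →
    ∃ nr : Nat, nr < 2^K ∧ (pvReduce B (Int.ofNat n)).2 = Int.ofNat nr := by
  intro B
  induction B with
  | nil => intro n _ hn; exact ⟨n, hn, rfl⟩
  | cons b rest ih =>
    intro n hB hn
    obtain ⟨nb, hnb, hbv⟩ := hB b (by simp)
    unfold pvReduce
    split
    · exact ⟨n, hn, rfl⟩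
    · simp only []
      by_cases he : PySem.Int.bitLength (Int.ofNat n) = PySem.Int.bitLength b
      · rw [if_pos he, hbv, pvBxor1]
        have : n ^^^ nb < 2^K := Nat.xor_lt_two_pow hn hnb
        obtain ⟨nr, h1, h2⟩ := ih (n ^^^ nb) (fun u hu => hB u (by simp [hu])) this
        exact ⟨nr, h1, h2⟩
      · rw [if_neg he]
        obtain ⟨nr, h1, h2⟩ := ih n (fun u hu => hB u (by simp [hu])) hn
        exact ⟨nr, h1, h2⟩

theorem pvInsertMem (B : List Int) (i : Nat) (v x : Int) (h : i ≤ B.length)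
    (hx : x ∈ PySem.List.insert B ((i : Nat) : Int) v) : x = v ∨ x ∈ B := by
  rw [PySem.List.insert_natCast _ i v h] at hx
  rcases List.mem_append.mp hx with h1 | h1
  · right
    have := List.take_append_drop i B
    rw [← this]
    exact List.mem_append.mpr (Or.inl h1)
  · rcases List.mem_cons.mp h1 with h2 | h2
    · left; exact h2
    · right
      have := List.take_append_drop i B
      rw [← this]
      exact List.mem_append.mpr (Or.inr h2)

theorem pvReduceBreak (m nc : Nat) (B : List Int)
    (hB : ∀ b ∈ B, ∃ nb : Nat, nb < 2^m ∧ b = Int.ofNat nb)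
    (h1 : 2^m ≤ nc) (h2 : nc < 2^(m+1)) :
    pvReduce B (Int.ofNat nc) = (0, Int.ofNat nc) := by
  cases B with
  | nil => rfl
  | cons b rest =>
    obtain ⟨nb, hnb, hbv⟩ := hB b (by simp)
    have hbl : PySem.Int.bitLength b ≤ m := by
      rw [hbv]; exact_mod_cast (pvBLle _ _).2 hnb
    have hcl : PySem.Int.bitLength (Int.ofNat nc) = m + 1 := by
      exact_mod_cast pvBLeq nc m h1 h2
    rw [pvReduce, if_pos (Or.inr (by omega))]

theorem pvPeel2 (m nc : Nat) (h1 : 2^m ≤ nc) (h2 : nc < 2^(m+1)) :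
    ∀ (P2 : List (Int × Int)) (B : List Int) (a : Int),
    (∀ b ∈ B, ∃ nb : Nat, nb < 2^m ∧ b = Int.ofNat nb) →
    (∀ p ∈ P2, ∃ n : Nat, n < 2^(m+1) ∧ p.1 = Int.ofNat n) →
    pvG (Int.ofNat nc :: B) a P2 = pvG B a (P2.map (pvGd m (Int.ofNat nc))) := by
  intro P2
  have hcbit : nc.testBit m = true := pvTestBitHigh nc m h1 h2
  have hcl : PySem.Int.bitLength (Int.ofNat nc) = m + 1 := by
    exact_mod_cast pvBLeq nc m h1 h2
  induction P2 with
  | nil => intro B a _ _; rfl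
  | cons p rest ih =>
    intro B a hB hP
    obtain ⟨n, hn, hpv⟩ := hP p (by simp)
    have hBgood : ∀ b ∈ B, PySem.Int.bitLength b ≤ m := by
      intro b hb
      obtain ⟨nb, hnb, hbv⟩ := hB b hb
      rw [hbv]; exact_mod_cast (pvBLle _ _).2 hnb
    by_cases hbit : n.testBit m
    · -- bit m set: xor with the peeled vector, then continue against B
      have hge : 2^m ≤ n := Nat.ge_two_pow_of_testBit hbit
      have hnne : (Int.ofNat n) ≠ 0 := pvInt_ofNat_ne_zero n (by omega)
      have hnl : PySem.Int.bitLength (Int.ofNat n) = m + 1 := by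
        exact_mod_cast pvBLeq n m hge hn
      have hxlt : n ^^^ nc < 2^m := by
        apply pvLtOfTestBitFalse _ _ (Nat.xor_lt_two_pow hn h2)
        rw [Nat.testBit_xor, hbit, hcbit]
        rfl
      have hred : pvReduce (Int.ofNat nc :: B) p.1 =
          ((pvReduce B (Int.ofNat (n ^^^ nc))).1 + 1, (pvReduce B (Int.ofNat (n ^^^ nc))).2) := by
        rw [hpv, pvReduce, if_neg (by push Not; exact ⟨hnne, by omega⟩)]
        simp only []
        rw [if_pos (by omega), pvBxor1]
      have hgd : pvGd m (Int.ofNat nc) p = (Int.ofNat (n ^^^ nc), p.2) := by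
        unfold pvGd
        rw [hpv, pvBitNat, if_pos hbit, if_pos (by norm_num), pvBxor1]
      simp only [List.map_cons, pvG, hred, hgd]
      obtain ⟨nr, hnr, hrv⟩ := pvReduceBound m B (n ^^^ nc) hB hxlt
      by_cases hz : (pvReduce B (Int.ofNat (n ^^^ nc))).2 ≠ 0
      · rw [if_pos hz, if_pos hz]
        have hle := pvReduce_le B (Int.ofNat (n ^^^ nc))
        rw [pvInsert_cons _ _ _ _ hle]
        apply ih _ a ?_ (fun q hq => hP q (by simp [hq]))
        intro b hb
        rcases pvInsertMem B _ _ b hle hb with hb1 | hb1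
        · exact ⟨nr, hnr, by rw [hb1, hrv]⟩
        · exact hB b hb1
      · rw [if_neg hz, if_neg hz]
        exact ih _ (a + p.2) hB (fun q hq => hP q (by simp [hq]))
    · -- bit m clear: the peeled vector is skipped
      have hgd : pvGd m (Int.ofNat nc) p = p := by
        unfold pvGd
        rw [hpv, pvBitNat, if_neg (by simp [hbit])]
      have hnlt : n < 2^m := pvLtOfTestBitFalse n m hn (by simpa using hbit)
      by_cases hn0 : n = 0
      · have hp0 : p.1 = 0 := by rw [hpv, hn0]; rfl
        have hred : pvReduce (Int.ofNat nc :: B) p.1 = (0, 0) := by rw [hp0, pvReduce_zero]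
        have hred2 : pvReduce B p.1 = (0, 0) := by rw [hp0, pvReduce_zero]
        simp only [List.map_cons, pvG, hred, hgd, hred2]
        simp only [ne_eq, not_true_eq_false, if_false]
        exact ih B (a + p.2) hB (fun q hq => hP q (by simp [hq]))
      · have hnne : (Int.ofNat n) ≠ 0 := pvInt_ofNat_ne_zero n hn0
        have hnl : PySem.Int.bitLength (Int.ofNat n) ≤ m := by
          exact_mod_cast (pvBLle _ _).2 hnlt
        have hred : pvReduce (Int.ofNat nc :: B) p.1 =
            ((pvReduce B p.1).1 + 1, (pvReduce B p.1).2) := by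
          rw [hpv, pvReduce, if_neg (by push Not; exact ⟨hnne, by omega⟩)]
          simp only []
          rw [if_neg (by omega)]
        simp only [List.map_cons, pvG, hred, hgd]
        obtain ⟨nr, hnr, hrv⟩ := pvReduceBound m B n hB hnlt
        by_cases hz : (pvReduce B p.1).2 ≠ 0
        · rw [if_pos hz, if_pos hz]
          have hle := pvReduce_le B p.1
          rw [pvInsert_cons _ _ _ _ hle]
          apply ih _ a ?_ (fun q hq => hP q (by simp [hq]))
          intro b hb
          rcases pvInsertMem B _ _ b hle hb with hb1 | hb1
          · rw [← hpv] at hrv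
            exact ⟨nr, hnr, by rw [hb1, hrv]⟩
          · exact hB b hb1
        · rw [if_neg hz, if_neg hz]
          exact ih B (a + p.2) hB (fun q hq => hP q (by simp [hq]))

theorem pvPeel (m nc : Nat) (o : Int) (h1 : 2^m ≤ nc) (h2 : nc < 2^(m+1)) :
    ∀ (P1 : List (Int × Int)) (B : List Int) (a : Int),
    (∀ b ∈ B, ∃ nb : Nat, nb < 2^m ∧ b = Int.ofNat nb) →
    (∀ p ∈ P1, ∃ n : Nat, n < 2^m ∧ p.1 = Int.ofNat n) →
    ∀ (P2 : List (Int × Int)),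
    (∀ p ∈ P2, ∃ n : Nat, n < 2^(m+1) ∧ p.1 = Int.ofNat n) →
    pvG B a (P1 ++ (Int.ofNat nc, o) :: P2) = pvG B a (P1 ++ P2.map (pvGd m (Int.ofNat nc))) := by
  intro P1
  induction P1 with
  | nil =>
    intro B a hB _ P2 hP2
    simp only [List.nil_append, pvG]
    rw [pvReduceBreak m nc B hB h1 h2]
    simp only [ne_eq, pvInt_ofNat_ne_zero nc (by omega), not_false_eq_true, if_true]
    have h0 : ((0 : Nat) : Int) = 0 := rfl
    rw [h0, PySem.List.insert_zero]
    exact pvPeel2 m nc h1 h2 P2 B a hB hP2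
  | cons p P1' ih =>
    intro B a hB hP1 P2 hP2
    obtain ⟨np, hnp, hpv⟩ := hP1 p (by simp)
    simp only [List.cons_append, pvG]
    by_cases hz : (pvReduce B p.1).2 ≠ 0
    · rw [if_pos hz, if_pos hz]
      obtain ⟨nr, hnr, hrv⟩ := pvReduceBound m B np hB hnp
      rw [← hpv] at hrv
      have hle := pvReduce_le B p.1
      apply ih _ a ?_ (fun q hq => hP1 q (by simp [hq])) P2 hP2
      intro b hb
      rcases pvInsertMem B _ _ b hle hb with hb1 | hb1
      · exact ⟨nr, hnr, by rw [hb1, hrv]⟩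
      · exact hB b hb1
    · rw [if_neg hz, if_neg hz]
      exact ih B (a + p.2) hB (fun q hq => hP1 q (by simp [hq])) P2 hP2

theorem pvBMain : ∀ (m : Nat) (s : List (Int × Int × Bool)) (a : Int),
    (∀ t ∈ s, t.2.2 = false → ∃ n : Nat, n < 2^m ∧ t.1 = Int.ofNat n) →
    pvG [] a (pvNP s) = a + pvAnsF (pvStages m s) := by
  intro m
  induction m with
  | zero =>
    intro s a h
    rw [pvStages]
    rw [pvG_zero (pvNP s) [] a ?_, pvAnsF_NP]
    intro p hp
    obtain ⟨t, ht, hq, hp1, _⟩ := pvNP_mem s p hp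
    obtain ⟨n, hn, hv⟩ := h t ht hq
    have : n = 0 := by omega
    rw [hp1, hv, this]; rfl
  | succ m ih =>
    intro s a h
    rw [pvStages]
    by_cases hall : ∀ t ∈ s, ¬(t.2.2 = false ∧ PySem.Int.band (t.1 >>> m) 1 ≠ 0)
    · rw [pvStage_id m s hall]
      apply ih s a
      intro t ht hq
      obtain ⟨n, hn, hv⟩ := h t ht hq
      have hb : PySem.Int.band (t.1 >>> m) 1 = 0 := by
        by_contra hc
        exact hall t ht ⟨hq, hc⟩
      rw [hv, pvBitNat] at hb
      have hbit : n.testBit m = false := by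
        by_cases hx : n.testBit m
        · rw [if_pos hx] at hb; norm_num at hb
        · simpa using hx
      exact ⟨n, pvLtOfTestBitFalse n m hn hbit, hv⟩
    · obtain ⟨s1, t, s2, hsplit, hPt, hs1⟩ :=
        pvFirst (fun t : Int × Int × Bool => t.2.2 = false ∧ PySem.Int.band (t.1 >>> m) 1 ≠ 0) s hall
      obtain ⟨hq, hband⟩ := hPt
      obtain ⟨nc, hnc, hcv⟩ := h t (by rw [hsplit]; simp) hq
      have hbitc : nc.testBit m = true := by
        rw [hcv, pvBitNat] at hband
        by_cases hx : nc.testBit m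
        · exact hx
        · rw [if_neg hx] at hband; norm_num at hband
      have hge : 2^m ≤ nc := Nat.ge_two_pow_of_testBit hbitc
      have ht3 : t = (t.1, t.2.1, false) := by
        rw [← hq]
      have hstage : pvStage m none s = s1 ++ (t.1, t.2.1, true) :: s2.map (pvF m t.1) := by
        rw [hsplit, pvStage_append m s1 _ hs1, ht3, pvStage_piv m t.1 t.2.1 s2 hband]
      have hmem1 : ∀ u ∈ s1, u ∈ s := by
        intro u hu; rw [hsplit]; simp [hu]
      have hmem2 : ∀ u ∈ s2, u ∈ s := by
        intro u hu; rw [hsplit]; simp [hu]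
      -- the pvNP decomposition of s and of the staged state
      have hNPs : pvNP s = pvNP s1 ++ (t.1, t.2.1) :: pvNP s2 := by
        rw [hsplit, pvNP_append, pvNP_cons]
        rw [hq]
        simp
      have hNPs' : pvNP (s1 ++ (t.1, t.2.1, true) :: s2.map (pvF m t.1)) =
          pvNP s1 ++ (pvNP s2).map (pvGd m t.1) := by
        rw [pvNP_append, pvNP_cons]
        simp only [if_pos]
        rw [pvNP_map]
        simp
      -- goodness of the pieces
      have hgood1 : ∀ p ∈ pvNP s1, ∃ n : Nat, n < 2^m ∧ p.1 = Int.ofNat n := by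
        intro p hp
        obtain ⟨u, hu, huq, hp1, _⟩ := pvNP_mem s1 p hp
        obtain ⟨n, hn, hv⟩ := h u (hmem1 u hu) huq
        have hb : PySem.Int.band (u.1 >>> m) 1 = 0 := by
          by_contra hc
          exact hs1 u hu ⟨huq, hc⟩
        rw [hv, pvBitNat] at hb
        have hbit : n.testBit m = false := by
          by_cases hx : n.testBit m
          · rw [if_pos hx] at hb; norm_num at hb
          · simpa using hx
        exact ⟨n, pvLtOfTestBitFalse n m hn hbit, by rw [hp1, hv]⟩
      have hgood2 : ∀ p ∈ pvNP s2, ∃ n : Nat, n < 2^(m+1) ∧ p.1 = Int.ofNat n := by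
        intro p hp
        obtain ⟨u, hu, huq, hp1, _⟩ := pvNP_mem s2 p hp
        obtain ⟨n, hn, hv⟩ := h u (hmem2 u hu) huq
        exact ⟨n, hn, by rw [hp1, hv]⟩
      calc pvG [] a (pvNP s)
          = pvG [] a (pvNP s1 ++ (Int.ofNat nc, t.2.1) :: pvNP s2) := by rw [hNPs, hcv]
        _ = pvG [] a (pvNP s1 ++ (pvNP s2).map (pvGd m (Int.ofNat nc))) := by
            exact pvPeel m nc t.2.1 hge hnc (pvNP s1) [] a (by simp) hgood1 (pvNP s2) hgood2
        _ = pvG [] a (pvNP (s1 ++ (t.1, t.2.1, true) :: s2.map (pvF m t.1))) := by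
            rw [hNPs', hcv]
        _ = a + pvAnsF (pvStages m (pvStage m none s)) := by
            rw [hstage]
            apply ih
            intro u hu huq
            rcases List.mem_append.mp hu with hu1 | hu1
            · obtain ⟨n, hn, hv⟩ := h u (hmem1 u hu1) huq
              have hb : PySem.Int.band (u.1 >>> m) 1 = 0 := by
                by_contra hc
                exact hs1 u hu1 ⟨huq, hc⟩
              rw [hv, pvBitNat] at hb
              have hbit : n.testBit m = false := by
                by_cases hx : n.testBit m
                · rw [if_pos hx] at hb; norm_num at hb
                · simpa using hx
              exact ⟨n, pvLtOfTestBitFalse n m hn hbit, hv⟩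
            · rcases List.mem_cons.mp hu1 with hu2 | hu2
              · rw [hu2] at huq; simp at huq
              · obtain ⟨v, hv2, hfv⟩ := List.mem_map.mp hu2
                have hvq : v.2.2 = false := by
                  -- pvF preserves the flag
                  rw [← hfv] at huq
                  unfold pvF at huq
                  split at huq <;> simpa using huq
                obtain ⟨n, hn, hvv⟩ := h v (hmem2 v hv2) hvq
                by_cases hcond : v.2.2 = false ∧ PySem.Int.band (v.1 >>> m) 1 ≠ 0
                · have hbitv : n.testBit m = true := by
                    obtain ⟨_, hb⟩ := hcond
                    rw [hvv, pvBitNat] at hb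
                    by_cases hx : n.testBit m
                    · exact hx
                    · rw [if_neg hx] at hb; norm_num at hb
                  refine ⟨n ^^^ nc, ?_, ?_⟩
                  · apply pvLtOfTestBitFalse _ _ (Nat.xor_lt_two_pow hn hnc)
                    rw [Nat.testBit_xor, hbitv, hbitc]
                    rfl
                  · rw [← hfv]
                    unfold pvF
                    rw [if_pos hcond]
                    simp only []
                    rw [hvv, hcv, pvBxor1]
                · have hfv2 : u = v := by rw [← hfv]; unfold pvF; rw [if_neg hcond]
                  have hb : PySem.Int.band (v.1 >>> m) 1 = 0 := by
                    by_contra hc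
                    exact hcond ⟨by rw [← hfv2]; exact huq, hc⟩
                  rw [hvv, pvBitNat] at hb
                  have hbit : n.testBit m = false := by
                    by_cases hx : n.testBit m
                    · rw [if_pos hx] at hb; norm_num at hb
                    · simpa using hx
                  exact ⟨n, pvLtOfTestBitFalse n m hn hbit, by rw [hfv2, hvv]⟩

-- the initial state of B's stages: curs are the masked windows, no pivots yet
theorem pvNP_init (mask : Int) : ∀ (rows : List Int),
    pvNP (rows.map (fun x => (PySem.Int.band x mask, x, false))) =
    rows.map (fun x => (PySem.Int.band x mask, x)) := by
  intro rows
  induction rows with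
  | nil => rfl
  | cons x rest ih =>
    rw [List.map_cons, pvNP_cons, List.map_cons, ih]
    simp

theorem pvMain (A : List Int) : compute_min_removed_sum_py A = compute_min_removed_sum_py_alt A := by
  by_cases hA : A = []
  · simp [compute_min_removed_sum_py, compute_min_removed_sum_py_alt, hA]
  · simp only [compute_min_removed_sum_py, compute_min_removed_sum_py_alt, if_neg hA]
    have hperm : (PySem.List.sorted A (fun v => v) true).Perm A := PySem.List.sorted_perm A (fun v => v) true
    rw [pvMaxPerm _ _ hperm]
    set m := PySem.Int.bitLength ((PySem.List.max? A (fun v => v)).getD 0) with hm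
    set rows := PySem.List.sorted A (fun v => v) true with hrows
    have hA' : (rows.foldl (fun (s : List Int × Int) x =>
        let a := pvAddLoop s.1 x m
        if a.2 then (a.1, s.2) else (a.1, s.2 + x)) (List.replicate m 0, 0)).2 =
        pvG [] 0 (rows.map (fun x => (PySem.Int.band x ((1 <<< m : Int) - 1), x))) := by
      exact pvFold m rows _ _ 0 0 (List.length_replicate)
        (fun i hi hne => absurd (pvRepl_getD _ i) hne)
        (pvRB_repl _ _).symm rfl
    rw [hA']
    have hB' := pvBMain m (rows.map (fun x => (PySem.Int.band x ((1 <<< m : Int) - 1), x, false))) 0 ?_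
    · rw [pvNP_init] at hB'
      rw [hB']
      simp only [zero_add]
      rfl
    · intro t ht _
      obtain ⟨x, _, hx⟩ := List.mem_map.mp ht
      refine ⟨pvW m x, pvW_lt m x, ?_⟩
      rw [← hx]
      simp only []
      exact pvBandMask m x

-- ===== VERDICT (by name: the statement is the Claim_ definition above) =====
theorem compute_min_removed_sum_py_spec : Claim_equal_compute_min_removed_sum_py := by
  unfold Claim_equal_compute_min_removed_sum_py Spec_compute_min_removed_sum_py
  exact fun A _ => pvMain A
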